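-- pv_equiv track=rewrite | github.com/patastronch/aoc | 2021/08.py | digit_inter
-- ===== SOURCE A (Python) =====
-- def digit_len(x):
--     l_x = len(x)
--     if l_x == 2:
--         return {1}
--     if l_x == 4:
--         return {4}
--     if l_x == 3:
--         return {7}
--     if l_x == 7:
--         return {8}
--     if l_x == 5:
--         return {2, 3, 5}
--     if l_x == 6:
--         return {0, 6, 9}
--
-- def digit_inter(x, y):
--     l_int = len({i for i in x}.intersection({i for i in y}))
--     l_x = len(x)
--     l_y = len(y)
--
--     if l_x == 2 and l_y == 5 and l_int == 1:
--         return {2, 5}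
--     if l_x == 2 and l_y == 5 and l_int == 2:
--         return {3}
--     if l_x == 2 and l_y == 6 and l_int == 1:
--         return {6}
--     if l_x == 2 and l_y == 6 and l_int == 2:
--         return {0, 9}
--
--     if l_x == 3 and l_y == 5 and l_int == 2:
--         return {2, 5}
--     if l_x == 3 and l_y == 5 and l_int == 3:
--         return {3}
--     if l_x == 3 and l_y == 6 and l_int == 2:
--         return {6}
--     if l_x == 3 and l_y == 6 and l_int == 3:
--         return {0, 9}
--
--     if l_x == 4 and l_y == 5 and l_int == 2:
--         return {2}
--     if l_x == 4 and l_y == 5 and l_int == 3: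
--         return {3, 5}
--     if l_x == 4 and l_y == 6 and l_int == 3:
--         return {6, 0}
--     if l_x == 4 and l_y == 6 and l_int == 4:
--         return {9}
--
--     return digit_len(y)
-- ===== SOURCE B (Python) =====
-- SEGMENTS = {0: "abcefg", 1: "cf", 2: "acdeg", 3: "acdfg", 4: "bcdf",
--             5: "abdfg", 6: "abdefg", 7: "acf", 8: "abcdefg", 9: "abcdfg"}
--
--
-- def digit_inter(x, y):
--     li = len(set(x) & set(y))
--     cand_x = [set(s) for s in SEGMENTS.values() if len(s) == len(x)]
--     if len(cand_x) == 1: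
--         sx = cand_x[0]
--         hit = {d for d, s in SEGMENTS.items()
--                if len(s) == len(y) and len(sx & set(s)) == li}
--         if hit:
--             return hit
--     fallback = {d for d, s in SEGMENTS.items() if len(s) == len(y)}
--     return fallback or None
-- ===== Notes on version B (the rewrite author's own statement) =====
-- stated objective: alternative
-- what changed: Instead of A's hand-enumerated 12-branch case cascade plus the digit_len length cascade, B derives the result from the canonical seven-segment encodings of the ten digits: it filters digits by segment count to find x's candidates, and when x's digit is unique it selects the digits of y's length whose canonical segment overlap with x's digit equals the observed intersection size, falling back to the digits of y's length otherwise.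
-- outside the precondition, e.g. on digit_inter('ab', 'a'): A returns None, B returns None
import Mathlib
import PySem

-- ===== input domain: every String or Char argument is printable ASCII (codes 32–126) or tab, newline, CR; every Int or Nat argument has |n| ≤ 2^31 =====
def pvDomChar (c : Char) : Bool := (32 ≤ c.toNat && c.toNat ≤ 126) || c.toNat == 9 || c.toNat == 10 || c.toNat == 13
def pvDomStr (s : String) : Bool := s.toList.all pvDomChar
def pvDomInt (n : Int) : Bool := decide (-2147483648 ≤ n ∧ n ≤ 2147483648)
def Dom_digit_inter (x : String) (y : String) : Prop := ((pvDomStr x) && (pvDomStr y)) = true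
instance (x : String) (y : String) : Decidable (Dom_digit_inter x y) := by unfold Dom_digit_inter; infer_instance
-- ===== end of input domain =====

-- B derives the answer from the canonical seven-segment encodings of the ten digits
-- (filter candidates by segment-count and overlap size) instead of A's hand-enumerated
-- 12-branch case cascade; objective: alternative, same cost. Pre_ excludes inputs with
-- len(y) outside 2..7, where A (via digit_len) returns None, not a set.


-- ===== PORT A =====
-- digit_len(x): returns none where the Python returns None (excluded by Pre_ when reached)
def digitLenA (x : List Char) : Option (List Int) :=
  let l_x := x.length
  if l_x = 2 then some [1]
  else if l_x = 4 then some [4]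
  else if l_x = 3 then some [7]
  else if l_x = 7 then some [8]
  else if l_x = 5 then some [2, 3, 5]
  else if l_x = 6 then some [0, 6, 9]
  else none

def digit_inter (x : String) (y : String) : List Int :=
  let l_int := (PySem.Set.inter (PySem.Set.ofList x.toList) (PySem.Set.ofList y.toList)).length
  let l_x := x.toList.length
  let l_y := y.toList.length
  if l_x = 2 ∧ l_y = 5 ∧ l_int = 1 then [2, 5]
  else if l_x = 2 ∧ l_y = 5 ∧ l_int = 2 then [3]
  else if l_x = 2 ∧ l_y = 6 ∧ l_int = 1 then [6]
  else if l_x = 2 ∧ l_y = 6 ∧ l_int = 2 then [0, 9]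
  else if l_x = 3 ∧ l_y = 5 ∧ l_int = 2 then [2, 5]
  else if l_x = 3 ∧ l_y = 5 ∧ l_int = 3 then [3]
  else if l_x = 3 ∧ l_y = 6 ∧ l_int = 2 then [6]
  else if l_x = 3 ∧ l_y = 6 ∧ l_int = 3 then [0, 9]
  else if l_x = 4 ∧ l_y = 5 ∧ l_int = 2 then [2]
  else if l_x = 4 ∧ l_y = 5 ∧ l_int = 3 then [3, 5]
  else if l_x = 4 ∧ l_y = 6 ∧ l_int = 3 then [0, 6]
  else if l_x = 4 ∧ l_y = 6 ∧ l_int = 4 then [9]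
  else (digitLenA y.toList).getD []   -- None (excluded by Pre_) rendered as []

-- ===== PORT B =====
-- SEGMENTS: the canonical seven-segment encoding of each digit
def segTable : List (Int × List Char) :=
  [(0, ['a','b','c','e','f','g']), (1, ['c','f']), (2, ['a','c','d','e','g']),
   (3, ['a','c','d','f','g']), (4, ['b','c','d','f']), (5, ['a','b','d','f','g']),
   (6, ['a','b','d','e','f','g']), (7, ['a','c','f']), (8, ['a','b','c','d','e','f','g']),
   (9, ['a','b','c','d','f','g'])]

def digit_inter_alt (x : String) (y : String) : List Int :=
  let li := (PySem.Set.inter (PySem.Set.ofList x.toList) (PySem.Set.ofList y.toList)).length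
  let cand_x := (segTable.filter (fun p => p.2.length = x.toList.length)).map (fun p => p.2)
  let hit : List Int :=
    match cand_x with
    | [sx] => (segTable.filter (fun p => p.2.length = y.toList.length ∧
                 (PySem.Set.inter (PySem.Set.ofList sx) (PySem.Set.ofList p.2)).length = li)).map Prod.fst
    | _ => []
  if hit ≠ [] then hit
  else (segTable.filter (fun p => p.2.length = y.toList.length)).map Prod.fst
       -- empty fallback = None (excluded by Pre_) rendered as []

-- ===== PRECONDITION & SPEC =====
-- Pre_ excludes inputs with len(y) ∉ 2..7: there A falls through to digit_len(y), which
-- returns None — not a value of the declared set type.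
def Pre_digit_inter (_x : String) (y : String) : Prop :=
  2 ≤ y.toList.length ∧ y.toList.length ≤ 7
instance (x : String) (y : String) : Decidable (Pre_digit_inter x y) := by
  unfold Pre_digit_inter; infer_instance

def pvWitness_digit_inter : String × String := ("ab", "abcde")

def Spec_digit_inter (x : String) (y : String) (out : List Int) : Prop := out = digit_inter_alt x y
instance (x : String) (y : String) (out : List Int) : Decidable (Spec_digit_inter x y out) := by
  unfold Spec_digit_inter; infer_instance

-- ===== CLAIM (what is proved, stated in full; the proofs are below) =====
def Claim_equal_digit_inter : Prop := ∀ (x : String) (y : String), Dom_digit_inter x y → Pre_digit_inter x y → Spec_digit_inter x y (digit_inter x y)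

-- ===== LEMMAS AND PROOFS =====

-- Both programs are the same function of the triple (l_x, l_y, l_int).
theorem core_eq (lx ly li : Nat) (h2 : 2 ≤ ly) (h7 : ly ≤ 7) (hli : li ≤ lx) :
    (if lx = 2 ∧ ly = 5 ∧ li = 1 then ([2, 5] : List Int)
     else if lx = 2 ∧ ly = 5 ∧ li = 2 then [3]
     else if lx = 2 ∧ ly = 6 ∧ li = 1 then [6]
     else if lx = 2 ∧ ly = 6 ∧ li = 2 then [0, 9]
     else if lx = 3 ∧ ly = 5 ∧ li = 2 then [2, 5]
     else if lx = 3 ∧ ly = 5 ∧ li = 3 then [3]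
     else if lx = 3 ∧ ly = 6 ∧ li = 2 then [6]
     else if lx = 3 ∧ ly = 6 ∧ li = 3 then [0, 9]
     else if lx = 4 ∧ ly = 5 ∧ li = 2 then [2]
     else if lx = 4 ∧ ly = 5 ∧ li = 3 then [3, 5]
     else if lx = 4 ∧ ly = 6 ∧ li = 3 then [0, 6]
     else if lx = 4 ∧ ly = 6 ∧ li = 4 then [9]
     else (digitLenA (List.replicate ly 'a')).getD []) =
    (let cand_x := (segTable.filter (fun p => p.2.length = lx)).map (fun p => p.2)
     let hit : List Int :=
       match cand_x with
       | [sx] => (segTable.filter (fun p => p.2.length = ly ∧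
                    (PySem.Set.inter (PySem.Set.ofList sx) (PySem.Set.ofList p.2)).length = li)).map Prod.fst
       | _ => []
     if hit ≠ [] then hit
     else (segTable.filter (fun p => p.2.length = ly)).map Prod.fst) := by
  by_cases hx2 : lx = 2
  · subst hx2; interval_cases ly <;> interval_cases li <;> decide
  by_cases hx3 : lx = 3
  · subst hx3; interval_cases ly <;> interval_cases li <;> decide
  by_cases hx4 : lx = 4
  · subst hx4; interval_cases ly <;> interval_cases li <;> decide
  by_cases hx7 : lx = 7
  · subst hx7; interval_cases ly <;> interval_cases li <;> decide
  by_cases hx5 : lx = 5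
  · subst hx5; interval_cases ly <;> interval_cases li <;> decide
  by_cases hx6 : lx = 6
  · subst hx6; interval_cases ly <;> interval_cases li <;> decide
  · have hnil : segTable.filter (fun p => decide (p.2.length = lx)) = [] := by
      rw [List.filter_eq_nil_iff]; intro a ha; fin_cases ha <;> simp <;> omega
    interval_cases ly <;>
      (simp only [hnil]
       simp [hx2, hx3, hx4, segTable, digitLenA])

-- ===== VERDICT (by name: the statement is the Claim_ definition above) =====
theorem digit_inter_spec : Claim_equal_digit_inter := by
  intro x y _ hpre
  obtain ⟨h2, h7⟩ := hpre
  show digit_inter x y = digit_inter_alt x y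
  have hli : (PySem.Set.inter (PySem.Set.ofList x.toList) (PySem.Set.ofList y.toList)).length
      ≤ x.toList.length :=
    le_trans (List.length_filter_le _ _) (PySem.Set.length_ofList_le _)
  have := core_eq x.toList.length y.toList.length
    (PySem.Set.inter (PySem.Set.ofList x.toList) (PySem.Set.ofList y.toList)).length h2 h7 hli
  simpa [digit_inter, digit_inter_alt, digitLenA] using this
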